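-- pv_equiv track=rewrite | github.com/codeit-bootcamp-frontend/0-study-algorithms | 프로그래머스/3/12987. 숫자 게임/숫자 게임.py | solution
-- ===== SOURCE A (Python) =====
-- def solution(A, B):
--     answer = 0
--     A.sort(reverse=True)
--     B.sort(reverse=True)
--     A_idx = 0
--     B_idx = 0
--     B_end_idx = len(B)
--
--     while A_idx < len(A) and B_idx < B_end_idx:
--         if A[A_idx] < B[B_idx]:
--             answer += 1
--             A_idx += 1
--             B_idx += 1
--         else:
--             A_idx += 1
--             B_end_idx -= 1
--
--     return answer
-- ===== SOURCE B (Python) =====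
-- def solution(A, B):
--     # Same in-place mutation as the original: both lists end up sorted descending.
--     A.sort(reverse=True)
--     B.sort(reverse=True)
--     m = min(len(A), len(B))
--     top = A[:m]
--     # The answer is the size of a maximum matching "b beats a" between B and the
--     # m largest elements of A.  By LP duality on this threshold bipartite graph,
--     # that equals the size of a minimum vertex cover, and an optimal cover is a
--     # threshold cover: for some t, take every b > t together with every a < t
--     # (the trivial cover of size m corresponds to t above all values).
--     best = m
--     for t in set(top):
--         best = min(best, sum(b > t for b in B) + sum(a < t for a in top))
--     return best
-- ===== Notes on version B (the rewrite author's own statement) =====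
-- stated objective: alternative
-- what changed: Replaces the greedy two-pointer scan by its LP dual: the answer is computed as the minimum over thresholds t of #{b in B : b > t} + #{a among the m largest of A : a < t} (minimum threshold vertex cover of the 'b beats a' bipartite graph), with no greedy matching pass at all.
import Mathlib
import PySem

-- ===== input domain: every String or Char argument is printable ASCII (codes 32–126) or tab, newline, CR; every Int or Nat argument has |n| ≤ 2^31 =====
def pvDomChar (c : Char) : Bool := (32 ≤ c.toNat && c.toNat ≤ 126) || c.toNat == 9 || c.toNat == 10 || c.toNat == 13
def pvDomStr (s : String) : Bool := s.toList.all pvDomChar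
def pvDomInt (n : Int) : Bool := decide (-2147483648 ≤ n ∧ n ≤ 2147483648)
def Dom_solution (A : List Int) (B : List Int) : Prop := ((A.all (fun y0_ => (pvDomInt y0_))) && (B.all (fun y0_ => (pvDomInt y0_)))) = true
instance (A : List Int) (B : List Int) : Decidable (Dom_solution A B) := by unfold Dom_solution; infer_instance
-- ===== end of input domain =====

-- B replaces A's greedy two-pointer scan by its LP dual: the answer is the minimum over
-- thresholds t of #{b in B : b > t} + #{a among the m largest of A : a < t} (objective:
-- alternative). Both A and B sort their list arguments descending in place; the
-- equivalence proved here is about the return value.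

-- ===== PORT A =====
-- the while loop of A, state (answer, A_idx, B_idx, B_end_idx); A[A_idx]/B[B_idx] are always
-- in range when read (guarded by the loop condition), so pyGet? … |>.getD 0 is exact there
def pvLoopA (As Bs : List Int) (answer i j e : Int) : Int :=
  if h : i < (As.length : Int) ∧ j < e then
    if ((PySem.List.pyGet? As i).getD 0) < ((PySem.List.pyGet? Bs j).getD 0) then
      pvLoopA As Bs (answer + 1) (i + 1) (j + 1) e
    else
      pvLoopA As Bs answer (i + 1) j (e - 1)
  else answer
termination_by ((As.length : Int) - i).toNat
decreasing_by all_goals (obtain ⟨h1, _⟩ := h; omega)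

def solution (A : List Int) (B : List Int) : Int :=
  let As := PySem.List.sorted A (fun x => x) (reverse := true)
  let Bs := PySem.List.sorted B (fun x => x) (reverse := true)
  pvLoopA As Bs 0 0 0 (Bs.length : Int)

-- ===== PORT B =====
def solution_alt (A : List Int) (B : List Int) : Int :=
  let As := PySem.List.sorted A (fun x => x) (reverse := true)
  let Bs := PySem.List.sorted B (fun x => x) (reverse := true)
  let m : Int := min (As.length : Int) (Bs.length : Int)
  let top := PySem.List.slice As none (some m)
  -- for t in set(top): best = min(best, sum(b > t for b in B) + sum(a < t for a in top))
  (PySem.Set.ofList top).foldl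
    (fun best t => min best
      ((Bs.countP (fun b => decide (b > t)) : Int) + (top.countP (fun a => decide (a < t)) : Int)))
    m

-- ===== PRECONDITION & SPEC =====
def Spec_solution (A : List Int) (B : List Int) (out : Int) : Prop := out = solution_alt A B
instance (A : List Int) (B : List Int) (out : Int) : Decidable (Spec_solution A B out) := by unfold Spec_solution; infer_instance

-- ===== CLAIM (what is proved, stated in full; the proofs are below) =====
def Claim_equal_solution : Prop := ∀ (A : List Int) (B : List Int), Dom_solution A B → Spec_solution A B (solution A B)

-- ===== LEMMAS AND PROOFS =====

-- the step of the descending greedy over the m largest A values (pointer j into Bs)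
def pvStep (Bs : List Int) : Int → Int → Int :=
  fun j a => if ((PySem.List.pyGet? Bs j).getD 0) > a then j + 1 else j

-- B's cover size at threshold t
def pvCover (Bs top : List Int) (t : Int) : Int :=
  ((Bs.countP (fun b => decide (b > t)) : Int) + (top.countP (fun a => decide (a < t)) : Int))

-- ---------- Step 1 (A's loop is the greedy fold), from the structure of the while loop ----------
-- Core invariant: with B_end_idx = |Bs| - (i - j) and 0 ≤ j ≤ i, A's while loop from state
-- (answer, i, j, e) returns answer plus the further matches of the greedy fold over the rest
-- of A[:len(B)], started from pointer j.
lemma pvLoopA_eq_fold (As Bs : List Int) :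
    ∀ (d : Nat) (i j answer : Int), ((As.length : Int) - i).toNat = d → 0 ≤ j → j ≤ i →
      pvLoopA As Bs answer i j ((Bs.length : Int) - (i - j)) =
        answer + (((As.take Bs.length).drop i.toNat).foldl (pvStep Bs) j - j) := by
  intro d
  induction d with
  | zero =>
    intro i j answer hd hj hji
    have hi : (As.length : Int) ≤ i := by omega
    rw [pvLoopA]
    have hdrop : ((As.take Bs.length).drop i.toNat) = [] := by
      apply List.drop_eq_nil_of_le
      have := @List.length_take _ Bs.length As
      omega
    simp only [hdrop, List.foldl_nil]
    have : ¬ (i < (As.length : Int) ∧ j < (Bs.length : Int) - (i - j)) := by omega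
    rw [dif_neg this]
    omega
  | succ d ih =>
    intro i j answer hd hj hji
    have hi : i < (As.length : Int) := by omega
    by_cases him : i < (Bs.length : Int)
    · -- loop body runs
      have hij : 0 ≤ i := by omega
      have hiN : i.toNat < As.length := by omega
      have hiM : i.toNat < Bs.length := by omega
      have hjM : j.toNat < Bs.length := by omega
      have hdrop : ((As.take Bs.length).drop i.toNat) =
          As[i.toNat] :: ((As.take Bs.length).drop (i.toNat + 1)) := by
        rw [List.drop_eq_getElem_cons (by simp; omega)]
        simp [List.getElem_take]
      have hga : PySem.List.pyGet? As i = some As[i.toNat] :=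
        PySem.List.pyGet?_eq_some_getElem As (by omega) (by omega)
      have hgb : PySem.List.pyGet? Bs j = some Bs[j.toNat] :=
        PySem.List.pyGet?_eq_some_getElem Bs (by omega) (by omega)
      rw [pvLoopA, dif_pos (by constructor <;> omega)]
      rw [hdrop, List.foldl_cons]
      by_cases hlt : As[i.toNat] < Bs[j.toNat]
      · rw [if_pos (by rw [hga, hgb]; simpa using hlt)]
        have hstep : pvStep Bs j As[i.toNat] = j + 1 := by
          unfold pvStep; rw [hgb]; simpa using hlt
        have he : (Bs.length : Int) - (i - j) = (Bs.length : Int) - ((i + 1) - (j + 1)) := by ring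
        rw [he, ih (i + 1) (j + 1) (answer + 1) (by omega) (by omega) (by omega)]
        rw [hstep]
        have : (i + 1).toNat = i.toNat + 1 := by omega
        rw [this]
        omega
      · rw [if_neg (by rw [hga, hgb]; simpa using hlt)]
        have hstep : pvStep Bs j As[i.toNat] = j := by
          unfold pvStep; rw [hgb]; simpa using hlt
        have he : (Bs.length : Int) - (i - j) - 1 = (Bs.length : Int) - ((i + 1) - j) := by ring
        rw [he, ih (i + 1) j answer (by omega) (by omega) (by omega)]
        rw [hstep]
        have : (i + 1).toNat = i.toNat + 1 := by omega
        rw [this]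
    · -- window exhausted: j < e fails exactly when i ≥ len(B)
      rw [pvLoopA]
      have hdrop : ((As.take Bs.length).drop i.toNat) = [] := by
        apply List.drop_eq_nil_of_le
        have := List.length_take_le Bs.length As
        omega
      simp only [hdrop, List.foldl_nil]
      have : ¬ (i < (As.length : Int) ∧ j < (Bs.length : Int) - (i - j)) := by omega
      rw [dif_neg this]
      omega

-- ---------- Step 2: greedy = min threshold cover ----------

-- the greedy pointer advances by at most one per element
lemma pvFold_le (Bs : List Int) (top : List Int) :
    ∀ (j : Int), top.foldl (pvStep Bs) j ≤ j + top.length := by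
  induction top with
  | nil => intro j; simp
  | cons a rest ih =>
    intro j
    have h := ih (pvStep Bs j a)
    have : pvStep Bs j a ≤ j + 1 := by unfold pvStep; split <;> omega
    simp only [List.foldl_cons, List.length_cons] at *
    push_cast at *
    omega

-- weak duality: any threshold cover bounds the greedy count (reads stay in range)
lemma pvLB (Bs : List Int) (t : Int) (top : List Int) :
    ∀ (j : Int), 0 ≤ j → j + top.length ≤ (Bs.length : Int) →
      top.foldl (pvStep Bs) j ≤
        j + (((Bs.drop j.toNat).countP (fun b => decide (b > t)) : Int)
             + (top.countP (fun a => decide (a < t)) : Int)) := by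
  induction top with
  | nil =>
    intro j hj hlen
    simp only [List.foldl_nil, List.countP_nil]
    have h1 : (0 : Int) ≤ ((Bs.drop j.toNat).countP (fun b => decide (b > t)) : Int) := by positivity
    omega
  | cons a rest ih =>
    intro j hj hlen
    simp only [List.length_cons] at hlen
    have hjN : j.toNat < Bs.length := by push_cast at hlen; omega
    have hgb : PySem.List.pyGet? Bs j = some Bs[j.toNat] :=
      PySem.List.pyGet?_eq_some_getElem Bs (by omega) (by omega)
    have hdrop : Bs.drop j.toNat = Bs[j.toNat] :: Bs.drop (j.toNat + 1) :=
      List.drop_eq_getElem_cons hjN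
    simp only [List.foldl_cons]
    by_cases hra : Bs[j.toNat] > a
    · -- match: pointer advances
      have hstep : pvStep Bs j a = j + 1 := by unfold pvStep; rw [hgb]; simpa using hra
      rw [hstep]
      have hIH := ih (j + 1) (by omega) (by push_cast at hlen ⊢; omega)
      have hj1 : (j + 1).toNat = j.toNat + 1 := by omega
      rw [hj1] at hIH
      have hcnt : (Bs.drop j.toNat).countP (fun b => decide (b > t)) =
          (Bs.drop (j.toNat + 1)).countP (fun b => decide (b > t))
            + (if Bs[j.toNat] > t then 1 else 0) := by
        rw [hdrop, List.countP_cons]; split <;> simp_all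
      have hcnt2 : (a :: rest).countP (fun a => decide (a < t)) =
          rest.countP (fun a => decide (a < t)) + (if a < t then 1 else 0) := by
        rw [List.countP_cons]; split <;> simp_all
      -- key: b > a forces b > t or a < t
      have hkey : Bs[j.toNat] > t ∨ a < t := by omega
      rcases hkey with hk | hk
      · rw [if_pos hk] at hcnt
        rw [hcnt, hcnt2]
        split <;> push_cast <;> omega
      · rw [hcnt, hcnt2, if_pos hk]
        split <;> push_cast <;> omega
    · -- skip: pointer stays
      have hstep : pvStep Bs j a = j := by unfold pvStep; rw [hgb]; simpa using hra
      rw [hstep]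
      have hIH := ih j hj (by push_cast at hlen ⊢; omega)
      have hcnt2 : (a :: rest).countP (fun a => decide (a < t)) =
          rest.countP (fun a => decide (a < t)) + (if a < t then 1 else 0) := by
        rw [List.countP_cons]; split <;> simp_all
      rw [hcnt2]
      split <;> push_cast at hIH ⊢ <;> omega

-- strong duality: either everything matched, or some threshold from top covers within the count
lemma pvUB (Bs : List Int) (hB : Bs.Pairwise (fun x y => y ≤ x)) (top : List Int) :
    ∀ (j : Int), top.Pairwise (fun x y => y ≤ x) → 0 ≤ j →
      top.foldl (pvStep Bs) j = j + top.length ∨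
      ∃ t ∈ top, (((Bs.drop j.toNat).countP (fun b => decide (b > t)) : Int)
                  + (top.countP (fun a => decide (a < t)) : Int)) ≤
                 top.foldl (pvStep Bs) j - j := by
  induction top with
  | nil => intro j _ _; left; simp
  | cons a rest ih =>
    intro j hsort hj
    have ha : ∀ x ∈ rest, x ≤ a := (List.pairwise_cons.mp hsort).1
    have hrest : rest.Pairwise (fun x y => y ≤ x) := (List.pairwise_cons.mp hsort).2
    simp only [List.foldl_cons]
    by_cases hra : ((PySem.List.pyGet? Bs j).getD 0) > a
    · -- match
      have hstep : pvStep Bs j a = j + 1 := by unfold pvStep; simpa using hra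
      rw [hstep]
      rcases ih (j + 1) hrest (by omega) with h | ⟨t, htmem, hb⟩
      · left
        rw [h]; simp; ring
      · right
        refine ⟨t, List.mem_cons_of_mem a htmem, ?_⟩
        have hta : t ≤ a := ha t htmem
        have hcnt2 : (a :: rest).countP (fun x => decide (x < t)) =
            rest.countP (fun x => decide (x < t)) := by
          rw [List.countP_cons]
          have : ¬ (a < t) := by omega
          simp [this]
        rw [hcnt2]
        have hj1 : (j + 1).toNat = j.toNat + 1 := by omega
        rw [hj1] at hb
        by_cases hjN : j.toNat < Bs.length
        · have hdrop : Bs.drop j.toNat = Bs[j.toNat] :: Bs.drop (j.toNat + 1) :=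
            List.drop_eq_getElem_cons hjN
          have hcnt : ((Bs.drop j.toNat).countP (fun b => decide (b > t)) : Int) ≤
              ((Bs.drop (j.toNat + 1)).countP (fun b => decide (b > t)) : Int) + 1 := by
            rw [hdrop, List.countP_cons]
            split <;> push_cast <;> omega
          omega
        · have hdrop : Bs.drop j.toNat = [] := List.drop_eq_nil_of_le (by omega)
          have hdrop1 : Bs.drop (j.toNat + 1) = [] := List.drop_eq_nil_of_le (by omega)
          rw [hdrop] at *
          rw [hdrop1] at hb
          simp only [List.countP_nil] at *
          omega
    · -- skip
      have hstep : pvStep Bs j a = j := by unfold pvStep; simpa using hra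
      rw [hstep]
      -- every remaining b is ≤ a (Bs descending, current head ≤ a)
      have hnb : ((Bs.drop j.toNat).countP (fun b => decide (b > a)) : Int) = 0 := by
        by_cases hjN : j.toNat < Bs.length
        · have hgb : PySem.List.pyGet? Bs j = some Bs[j.toNat] :=
            PySem.List.pyGet?_eq_some_getElem Bs (by omega) (by omega)
          rw [hgb] at hra
          simp only [Option.getD_some] at hra
          have hdrop : Bs.drop j.toNat = Bs[j.toNat] :: Bs.drop (j.toNat + 1) :=
            List.drop_eq_getElem_cons hjN
          have hpw := (hB.sublist (List.drop_sublist j.toNat Bs))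
          rw [hdrop] at hpw
          have hle : ∀ x ∈ Bs.drop j.toNat, x ≤ Bs[j.toNat] := by
            intro x hx
            rw [hdrop] at hx
            rcases List.mem_cons.mp hx with h | h
            · omega
            · exact (List.pairwise_cons.mp hpw).1 x h
          have : (Bs.drop j.toNat).countP (fun b => decide (b > a)) = 0 := by
            apply List.countP_eq_zero.mpr
            intro x hx
            have := hle x hx
            simp only [decide_eq_true_eq]
            omega
          simp [this]
        · have hdrop : Bs.drop j.toNat = [] := List.drop_eq_nil_of_le (by omega)
          simp [hdrop]
      rcases ih j hrest hj with h | ⟨t, htmem, hb⟩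
      · -- all of rest matched: threshold a covers
        right
        refine ⟨a, List.mem_cons_self, ?_⟩
        have hcnt2 : (a :: rest).countP (fun x => decide (x < a)) =
            rest.countP (fun x => decide (x < a)) := by
          rw [List.countP_cons]; simp
        rw [hcnt2, hnb, h]
        have := List.countP_le_length (l := rest) (p := fun x => decide (x < a))
        omega
      · right
        refine ⟨t, List.mem_cons_of_mem a htmem, ?_⟩
        have hta : t ≤ a := ha t htmem
        have hcnt2 : (a :: rest).countP (fun x => decide (x < t)) =
            rest.countP (fun x => decide (x < t)) := by
          rw [List.countP_cons]
          have : ¬ (a < t) := by omega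
          simp [this]
        rw [hcnt2]
        omega

-- ---------- fold-min facts ----------
lemma pvFoldMin_le_init (Bs top : List Int) (l : List Int) :
    ∀ (init : Int),
      l.foldl (fun best t => min best
        ((Bs.countP (fun b => decide (b > t)) : Int)
         + (top.countP (fun a => decide (a < t)) : Int))) init ≤ init := by
  induction l with
  | nil => intro init; simp
  | cons a rest ih =>
    intro init
    simp only [List.foldl_cons]
    exact le_trans (ih _) (min_le_left _ _)

lemma pvFoldMin_le_mem (Bs top : List Int) (l : List Int) :
    ∀ (init : Int) (t : Int), t ∈ l →
      l.foldl (fun best t => min best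
        ((Bs.countP (fun b => decide (b > t)) : Int)
         + (top.countP (fun a => decide (a < t)) : Int))) init ≤
      ((Bs.countP (fun b => decide (b > t)) : Int)
       + (top.countP (fun a => decide (a < t)) : Int)) := by
  induction l with
  | nil => intro _ t ht; simp at ht
  | cons a rest ih =>
    intro init t ht
    simp only [List.foldl_cons]
    rcases List.mem_cons.mp ht with h | h
    · subst h
      exact le_trans (pvFoldMin_le_init Bs top rest _) (min_le_right _ _)
    · exact ih _ t h

lemma pvLe_foldMin (Bs top : List Int) (l : List Int) (J : Int) :
    ∀ (init : Int), J ≤ init →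
      (∀ t ∈ l, J ≤ ((Bs.countP (fun b => decide (b > t)) : Int)
                     + (top.countP (fun a => decide (a < t)) : Int))) →
      J ≤ l.foldl (fun best t => min best
        ((Bs.countP (fun b => decide (b > t)) : Int)
         + (top.countP (fun a => decide (a < t)) : Int))) init := by
  induction l with
  | nil => intro init h _; simpa using h
  | cons a rest ih =>
    intro init h hall
    simp only [List.foldl_cons]
    exact ih _ (le_min h (hall a List.mem_cons_self)) (fun t ht => hall t (List.mem_cons_of_mem a ht))

-- ---------- assembly ----------
lemma pvMain (As Bs : List Int)
    (hA : As.Pairwise (fun x y => y ≤ x)) (hB : Bs.Pairwise (fun x y => y ≤ x)) :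
    pvLoopA As Bs 0 0 0 (Bs.length : Int) =
      (PySem.Set.ofList (PySem.List.slice As none (some (min (As.length : Int) (Bs.length : Int))))).foldl
        (fun best t => min best
          ((Bs.countP (fun b => decide (b > t)) : Int)
           + ((PySem.List.slice As none (some (min (As.length : Int) (Bs.length : Int)))).countP
               (fun a => decide (a < t)) : Int)))
        (min (As.length : Int) (Bs.length : Int)) := by
  -- the slice is the m largest elements of As, which is also As.take Bs.length
  have hmn : (min (As.length : Int) (Bs.length : Int)) = ((min As.length Bs.length : Nat) : Int) := by
    push_cast; omega
  have hslice : PySem.List.slice As none (some (min (As.length : Int) (Bs.length : Int))) =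
      As.take Bs.length := by
    rw [hmn, PySem.List.slice_to_natCast]
    rcases le_total As.length Bs.length with h | h
    · rw [min_eq_left h, List.take_of_length_le h, List.take_length]
    · rw [min_eq_right h]
  rw [hslice]
  set top := As.take Bs.length with htop
  have hTopSort : top.Pairwise (fun x y => y ≤ x) := hA.sublist (List.take_sublist _ _)
  have htoplen : top.length = min As.length Bs.length := by
    rw [htop, List.length_take]; omega
  have hlenle : (top.length : Int) ≤ (Bs.length : Int) := by
    rw [htoplen]; push_cast; omega
  -- left side: A's loop is the greedy fold
  have hloop := pvLoopA_eq_fold As Bs (((As.length : Int) - 0).toNat) 0 0 0 rfl (by omega) (by omega)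
  rw [show (Bs.length : Int) - (0 - 0) = (Bs.length : Int) by ring] at hloop
  simp only [Int.toNat_zero, List.drop_zero] at hloop
  rw [← htop] at hloop
  rw [hloop]
  set J := top.foldl (pvStep Bs) 0 with hJ
  simp only [zero_add, sub_zero]
  have hinit : (min (As.length : Int) (Bs.length : Int)) = (top.length : Int) := by
    rw [htoplen]; push_cast; omega
  rw [hinit]
  apply le_antisymm
  · -- J ≤ fold min: weak duality plus the trivial cover
    apply pvLe_foldMin Bs top
    · have := pvFold_le Bs top 0
      omega
    · intro t _
      have := pvLB Bs t top 0 (by omega) (by simpa using hlenle)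
      simp only [Int.toNat_zero, List.drop_zero] at this
      omega
  · -- fold min ≤ J: strong duality
    rcases pvUB Bs hB top 0 hTopSort (by omega) with h | ⟨t, htmem, hb⟩
    · -- all matched: the initial trivial cover |top| already equals J
      have h2 : (top.length : Int) = J := by omega
      rw [← h2]
      exact pvFoldMin_le_init Bs top _ _
    · have htset : t ∈ PySem.Set.ofList top := by
        rw [PySem.Set.mem_ofList]; exact htmem
      have h1 := pvFoldMin_le_mem Bs top (PySem.Set.ofList top) (top.length : Int) t htset
      simp only [Int.toNat_zero, List.drop_zero] at hb
      omega

-- sortedness of the descending sorts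
lemma pvSorted_desc (xs : List Int) :
    (PySem.List.sorted xs (fun x => x) (reverse := true)).Pairwise (fun x y => y ≤ x) :=
  PySem.List.sorted_pairwise_rev xs (fun x => x)

-- ===== VERDICT (by name: the statement is the Claim_ definition above) =====
theorem solution_spec : Claim_equal_solution := by
  intro A B _
  unfold Spec_solution solution solution_alt
  exact pvMain _ _ (pvSorted_desc A) (pvSorted_desc B)
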